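-- pv_equiv track=rewrite | github.com/roccoren/audio-rt | app/auth.py | _parse_env_set
-- ===== SOURCE A (Python) =====
-- from typing import Any, Iterable, Optional
--
-- def _parse_env_set(value: Optional[str]) -> frozenset[str]:
--     if not value:
--         return frozenset()
--     separators = {",", " ", ";", "\n"}
--     tokens: list[str] = []
--     current = []
--     for char in value:
--         if char in separators:
--             token = "".join(current).strip()
--             if token:
--                 tokens.append(token)
--             current = []
--         else:
--             current.append(char)
--     last_token = "".join(current).strip()
--     if last_token:
--         tokens.append(last_token)
--     return frozenset(tokens)
-- ===== SOURCE B (Python) =====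
-- import re
--
-- def _parse_env_set(value):
--     if not value:
--         return frozenset()
--     return frozenset(
--         token
--         for part in re.split(r"[,; \n]", value)
--         for token in [part.strip()]
--         if token
--     )
-- ===== Notes on version B (the rewrite author's own statement) =====
-- stated objective: idiomatic
-- what changed: Replaces the manual per-character tokenizer (explicit current buffer and per-char branching) with a single re.split on the separator class followed by strip-and-filter of the pieces.
import Mathlib
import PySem

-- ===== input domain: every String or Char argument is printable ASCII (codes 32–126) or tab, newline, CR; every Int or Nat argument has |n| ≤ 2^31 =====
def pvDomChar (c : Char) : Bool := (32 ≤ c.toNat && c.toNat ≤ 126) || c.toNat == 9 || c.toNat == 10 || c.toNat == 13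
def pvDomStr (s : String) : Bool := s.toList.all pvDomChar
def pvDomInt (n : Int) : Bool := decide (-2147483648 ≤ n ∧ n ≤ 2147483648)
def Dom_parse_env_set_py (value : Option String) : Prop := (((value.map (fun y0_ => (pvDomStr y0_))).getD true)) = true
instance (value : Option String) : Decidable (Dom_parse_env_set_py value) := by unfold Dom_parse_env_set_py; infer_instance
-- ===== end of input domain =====

-- B replaces A's per-character tokenizer loop with one split-on-separators pass followed by
-- strip-and-filter of the pieces (idiomatic; same O(n) cost).

-- ===== PORT A =====
-- char in {",", " ", ";", "\n"}
def pvSep (c : Char) : Bool := c = ',' || c = ' ' || c = ';' || c = '\n'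

-- the for-loop over value plus the trailing last_token handling; state = (current, tokens)
def pvALoop : List Char → List Char → List String → List String
  | [], current, tokens =>
      let t := PySem.Str.strip (String.mk current)
      if t ≠ "" then tokens ++ [t] else tokens
  | c :: cs, current, tokens =>
      if pvSep c then
        let t := PySem.Str.strip (String.mk current)
        pvALoop cs [] (if t ≠ "" then tokens ++ [t] else tokens)
      else
        pvALoop cs (current ++ [c]) tokens

def parse_env_set_py (value : Option String) : List String :=
  match value with
  | none => []
  | some s => if s = "" then [] else PySem.Set.ofList (pvALoop s.toList [] [])

-- ===== PORT B =====
-- hand port of re.split(r"[,; \n]", value): cut the char list at every separator char (exact)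
def pvSplit : List Char → List (List Char)
  | [] => [[]]
  | c :: cs =>
      let r := pvSplit cs
      if pvSep c then [] :: r else (c :: r.headD []) :: r.tail

def parse_env_set_py_alt (value : Option String) : List String :=
  match value with
  | none => []
  | some s =>
      if s = "" then [] else
        PySem.Set.ofList
          (((pvSplit s.toList).map (fun p => PySem.Str.strip (String.mk p))).filter
            (fun t => t ≠ ""))

-- ===== PRECONDITION & SPEC =====
def Spec_parse_env_set_py (value : Option String) (out : List String) : Prop := out = parse_env_set_py_alt value
instance (value : Option String) (out : List String) : Decidable (Spec_parse_env_set_py value out) := by unfold Spec_parse_env_set_py; infer_instance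

-- ===== CLAIM (what is proved, stated in full; the proofs are below) =====
def Claim_equal_parse_env_set_py : Prop := ∀ (value : Option String), Dom_parse_env_set_py value → Spec_parse_env_set_py value (parse_env_set_py value)

-- ===== LEMMAS AND PROOFS =====

theorem pvSplit_sepFree (l : List Char) (h : ∀ c ∈ l, pvSep c = false) :
    pvSplit l = [l] := by
  induction l with
  | nil => rfl
  | cons a l ih =>
      have ha : pvSep a = false := h a (List.mem_cons_self ..)
      have := ih (fun c hc => h c (List.mem_cons_of_mem _ hc))
      simp [pvSplit, ha, this]

theorem pvSplit_append_sep (l : List Char) (c : Char) (rest : List Char)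
    (h : ∀ x ∈ l, pvSep x = false) (hc : pvSep c = true) :
    pvSplit (l ++ c :: rest) = l :: pvSplit rest := by
  induction l with
  | nil => simp [pvSplit, hc]
  | cons a l ih =>
      have ha : pvSep a = false := h a (List.mem_cons_self ..)
      have := ih (fun x hx => h x (List.mem_cons_of_mem _ hx))
      simp [pvSplit, ha, this]

theorem pvALoop_eq_split (cs : List Char) :
    ∀ (current : List Char) (tokens : List String),
      (∀ c ∈ current, pvSep c = false) →
      pvALoop cs current tokens =
        tokens ++ ((pvSplit (current ++ cs)).map (fun p => PySem.Str.strip (String.mk p))).filter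
          (fun t => t ≠ "") := by
  induction cs with
  | nil =>
      intro current tokens h
      simp [pvALoop, pvSplit_sepFree current h]
      split_ifs with ht <;> simp [ht]
  | cons c cs ih =>
      intro current tokens h
      by_cases hc : pvSep c = true
      · have hs := pvSplit_append_sep current c cs h hc
        simp only [pvALoop, hc, if_pos, hs]
        rw [ih [] _ (by simp)]
        simp only [List.map_cons, List.filter_cons]
        split_ifs with ht <;> simp_all
      · have hc' : pvSep c = false := by simpa using hc
        have : current ++ c :: cs = (current ++ [c]) ++ cs := by simp
        rw [this]
        have hcur : ∀ x ∈ current ++ [c], pvSep x = false := by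
          intro x hx
          rcases List.mem_append.mp hx with hx | hx
          · exact h x hx
          · simp at hx; subst hx; exact hc'
        simpa [pvALoop, hc'] using ih (current ++ [c]) tokens hcur

-- ===== VERDICT (by name: the statement is the Claim_ definition above) =====
theorem parse_env_set_py_spec : Claim_equal_parse_env_set_py := by
  intro value _
  unfold Spec_parse_env_set_py parse_env_set_py parse_env_set_py_alt
  match value with
  | none => rfl
  | some s =>
      by_cases hs : s = ""
      · simp [hs]
      · simp only [hs, reduceIte]
        rw [pvALoop_eq_split s.toList [] [] (by simp)]
        simp
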